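-- pv_equiv track=rewrite | github.com/hanwei7788/LM-auto | automatedtesting/qa-tools/plotfaster/exporter/exporter.py | find_max_time_value
-- ===== SOURCE A (Python) =====
-- def find_max_time_value(curve, old_max_time_value):
-- 	found_time, found_value = old_max_time_value
-- 	for time, value in curve:
-- 		if (value > found_value):
-- 			found_value = value
-- 		if (time > found_time):
-- 			found_time = time
--
-- 	return (found_time, found_value)
-- ===== SOURCE B (Python) =====
-- def find_max_time_value(curve, old_max_time_value):
--     pts = list(curve)
--     found_time = max([old_max_time_value[0]] + [t for t, _ in pts])
--     found_value = max([old_max_time_value[1]] + [v for _, v in pts])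
--     return (found_time, found_value)
-- ===== Notes on version B (the rewrite author's own statement) =====
-- stated objective: idiomatic
-- what changed: Replaces the single combined loop updating two accumulators with two independent max() reductions over the materialized point list, each seeded with the old value so the seed wins ties.
import Mathlib
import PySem

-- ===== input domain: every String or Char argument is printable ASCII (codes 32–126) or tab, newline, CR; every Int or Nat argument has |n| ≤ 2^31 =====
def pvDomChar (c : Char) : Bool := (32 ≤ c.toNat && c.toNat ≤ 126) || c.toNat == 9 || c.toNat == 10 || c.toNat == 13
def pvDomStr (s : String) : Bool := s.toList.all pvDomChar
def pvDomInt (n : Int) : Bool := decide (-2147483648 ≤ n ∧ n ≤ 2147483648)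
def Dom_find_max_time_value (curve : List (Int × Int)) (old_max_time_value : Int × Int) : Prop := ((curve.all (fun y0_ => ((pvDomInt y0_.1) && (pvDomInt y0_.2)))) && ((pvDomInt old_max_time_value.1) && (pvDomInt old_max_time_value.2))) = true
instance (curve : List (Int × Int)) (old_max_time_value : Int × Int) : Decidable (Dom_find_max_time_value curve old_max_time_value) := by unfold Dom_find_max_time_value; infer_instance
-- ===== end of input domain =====

-- B replaces A's single two-accumulator loop with two independent seeded max reductions (idiomatic decomposition, same cost).

-- ===== PORT A =====
-- one loop over curve, state (found_time, found_value), value checked before time as in A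
def find_max_time_value (curve : List (Int × Int)) (old_max_time_value : Int × Int) : Int × Int :=
  let st := curve.foldl
    (fun (st : Int × Int) (tv : Int × Int) =>
      let found_value := if tv.2 > st.2 then tv.2 else st.2
      let found_time := if tv.1 > st.1 then tv.1 else st.1
      (found_time, found_value))
    (old_max_time_value.1, old_max_time_value.2)
  (st.1, st.2)

-- ===== PORT B =====
-- python max over a nonempty list [seed] + projections = foldl max seed
def find_max_time_value_alt (curve : List (Int × Int)) (old_max_time_value : Int × Int) : Int × Int :=
  let pts := curve
  let found_time := (pts.map Prod.fst).foldl max old_max_time_value.1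
  let found_value := (pts.map Prod.snd).foldl max old_max_time_value.2
  (found_time, found_value)

-- ===== PRECONDITION & SPEC =====
def Spec_find_max_time_value (curve : List (Int × Int)) (old_max_time_value : Int × Int) (out : Int × Int) : Prop := out = find_max_time_value_alt curve old_max_time_value
instance (curve : List (Int × Int)) (old_max_time_value : Int × Int) (out : Int × Int) : Decidable (Spec_find_max_time_value curve old_max_time_value out) := by unfold Spec_find_max_time_value; infer_instance

-- ===== CLAIM (what is proved, stated in full; the proofs are below) =====
def Claim_equal_find_max_time_value : Prop := ∀ (curve : List (Int × Int)) (old_max_time_value : Int × Int), Dom_find_max_time_value curve old_max_time_value → Spec_find_max_time_value curve old_max_time_value (find_max_time_value curve old_max_time_value)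

-- ===== LEMMAS AND PROOFS =====
theorem fmtv_eq (curve : List (Int × Int)) (st : Int × Int) :
    find_max_time_value curve st = find_max_time_value_alt curve st := by
  induction curve generalizing st with
  | nil => simp [find_max_time_value, find_max_time_value_alt]
  | cons p tl ih =>
    have h := ih (if p.1 > st.1 then p.1 else st.1, if p.2 > st.2 then p.2 else st.2)
    simp [find_max_time_value, find_max_time_value_alt, List.foldl_cons] at h ⊢
    rw [h]
    have h1 : (if st.1 < p.1 then p.1 else st.1) = max st.1 p.1 := by
      simp [max_def]; split_ifs <;> omega
    have h2 : (if st.2 < p.2 then p.2 else st.2) = max st.2 p.2 := by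
      simp [max_def]; split_ifs <;> omega
    rw [h1, h2]

-- ===== VERDICT (by name: the statement is the Claim_ definition above) =====
theorem find_max_time_value_spec : Claim_equal_find_max_time_value := by
  intro curve old _
  exact fmtv_eq curve old
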